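-- pv_equiv track=rewrite | github.com/md-mudassir7/Python-Programs | stringOperations.py | f
-- ===== SOURCE A (Python) =====
-- def f(a,b):
--     if len(a)==len(b):
--         flag=0
--         for i in range(len(a)):
--             for j in range(i+1,len(a)+1):
--                 if a[i:j].count('1')%2==0 and a[i:j].count('1')>0:
--                     if (a[0:i]+a[i:j][::-1]+a[j:len(a)])==b:
--                             return True
--     return False
-- ===== SOURCE B (Python) =====
-- def f(a, b):
--     n = len(a)
--     if n != len(b):
--         return False
--     # longest common prefix length l and last-mismatch index r
--     l = 0
--     while l < n and a[l] == b[l]: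
--         l += 1
--     r = n - 1
--     while r >= 0 and a[r] == b[r]:
--         r -= 1
--     # a[:i]+a[i:j][::-1]+a[j:] == b  iff  i <= l, j >= r+1 and a[i:j][::-1] == b[i:j];
--     # enumerate windows by center s = i+j, expanding outward while the reversal
--     # condition holds, maintaining the '1'-count of the window incrementally.
--     for s in range(1, 2 * n):
--         if s % 2 == 0:
--             i = j = s // 2
--             cnt = 0
--             good = True
--         else:
--             i, j = s // 2, s // 2 + 1
--             cnt = 1 if a[i] == '1' else 0
--             good = a[i] == b[i]
--         while good:
--             if i < j and i <= l and j >= r + 1 and cnt > 0 and cnt % 2 == 0: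
--                 return True
--             if i == 0 or j == n:
--                 break
--             i -= 1
--             j += 1
--             cnt += (a[i] == '1') + (a[j - 1] == '1')
--             good = a[i] == b[j - 1] and a[j - 1] == b[i]
--     return False
-- ===== Notes on version B (the rewrite author's own statement) =====
-- stated objective: faster
-- what changed: A tries every substring (O(n^2) windows) and rebuilds and compares whole strings for each (O(n^3) total); B first locates the longest common prefix/suffix of a and b (which characterises the admissible window ends), then enumerates reversal windows by their center, expanding outward only while the reversal condition still holds and maintaining the window's '1'-count incrementally, O(1) per window.
import Mathlib
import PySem

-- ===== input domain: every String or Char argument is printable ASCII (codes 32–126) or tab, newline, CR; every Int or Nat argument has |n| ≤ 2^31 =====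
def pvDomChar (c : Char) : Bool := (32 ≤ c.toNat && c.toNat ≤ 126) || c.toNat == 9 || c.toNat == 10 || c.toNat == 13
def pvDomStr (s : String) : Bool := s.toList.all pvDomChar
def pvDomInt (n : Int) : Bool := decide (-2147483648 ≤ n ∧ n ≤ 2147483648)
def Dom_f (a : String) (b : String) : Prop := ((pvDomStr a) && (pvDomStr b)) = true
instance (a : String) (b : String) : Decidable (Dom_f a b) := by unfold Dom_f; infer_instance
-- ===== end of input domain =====

-- B replaces A's cubic scan of all substrings by: locate the longest common prefix/suffix
-- (which decides where a reversal window may start/end), then enumerate reversal windows by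
-- their CENTER, expanding outward only while the reversal condition still holds and keeping
-- the window's '1'-count incrementally.  Objective: faster (quadratic instead of cubic).

-- ===== PORT A =====
def f (a : String) (b : String) : Bool :=
  if PySem.Str.len a == PySem.Str.len b then
    -- flag=0 in the source is dead code
    (PySem.List.pyRange 0 (PySem.Str.len a) 1).any (fun i =>          -- for i in range(len(a)): … return True / fall through
      (PySem.List.pyRange (i + 1) (PySem.Str.len a + 1) 1).any (fun j =>
        (PySem.Chars.count (PySem.List.slice a.toList (some i) (some j)) ['1'] % 2 == 0 &&
         decide (0 < PySem.Chars.count (PySem.List.slice a.toList (some i) (some j)) ['1'])) &&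
        ((PySem.List.slice a.toList (some 0) (some i)
            ++ ((PySem.List.slice? (PySem.List.slice a.toList (some i) (some j)) none none (-1)).getD [])  -- a[i:j][::-1]
            ++ PySem.List.slice a.toList (some j) (some (PySem.Str.len a))) == b.toList)))
  else false

-- ===== PORT B =====
-- port of Source B's leading `while l < n and a[l] == b[l]: l += 1` loop: length of the
-- longest common prefix, by walking both lists together (exact)
def lcpLen : List Char → List Char → Nat
  | x :: xs, y :: ys => if x == y then lcpLen xs ys + 1 else 0
  | _, _ => 0

-- port of Source B's inner `while good:` loop (window [i,j) expands to [i-1,j+1) each step)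
def expandB (A B : List Char) (n l : Nat) (r : Int) (i j : Nat) (cnt : Int) (good : Bool) : Bool :=
  if good then
    if i < j && i ≤ l && decide ((j : Int) ≥ r + 1) && cnt > 0 && cnt % 2 == 0 then true
    else if i == 0 || j == n then false
    else
      let i' := i - 1
      let j' := j + 1
      let cnt' := cnt + (if PySem.List.pyGetD A (i' : Int) ' ' == '1' then 1 else 0)
                      + (if PySem.List.pyGetD A ((j' : Int) - 1) ' ' == '1' then 1 else 0)
      expandB A B n l r i' j' cnt'
        ((PySem.List.pyGetD A (i' : Int) ' ' == PySem.List.pyGetD B ((j' : Int) - 1) ' ') &&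
         (PySem.List.pyGetD A ((j' : Int) - 1) ' ' == PySem.List.pyGetD B (i' : Int) ' '))
  else false
termination_by i
decreasing_by
  simp only [Bool.or_eq_true, beq_iff_eq, not_or] at *
  omega

def f_alt (a : String) (b : String) : Bool :=
  let A := a.toList
  let B := b.toList
  let n := A.length
  if n ≠ B.length then false
  else
    let l := lcpLen A B
    -- port of the backwards `while r >= 0 and a[r] == b[r]: r -= 1` loop: the walk from the
    -- end is the forward walk over the reversed lists (exact)
    let r : Int := (n : Int) - 1 - (lcpLen A.reverse B.reverse : Int)
    (PySem.List.pyRange 1 (2 * (n : Int)) 1).any (fun s =>            -- for s in range(1, 2*n):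
      if PySem.Int.mod s 2 == 0 then
        let m := (PySem.Int.floordiv s 2).toNat
        expandB A B n l r m m 0 true
      else
        let m := (PySem.Int.floordiv s 2).toNat
        expandB A B n l r m (m + 1)
          (if PySem.List.pyGetD A (m : Int) ' ' == '1' then 1 else 0)
          (PySem.List.pyGetD A (m : Int) ' ' == PySem.List.pyGetD B (m : Int) ' '))

-- ===== PRECONDITION & SPEC =====
def Spec_f (a : String) (b : String) (out : Bool) : Prop := out = f_alt a b
instance (a : String) (b : String) (out : Bool) : Decidable (Spec_f a b out) := by unfold Spec_f; infer_instance

-- ===== CLAIM (what is proved, stated in full; the proofs are below) =====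
def Claim_equal_f : Prop := ∀ (a : String) (b : String), Dom_f a b → Spec_f a b (f a b)

-- ===== LEMMAS AND PROOFS =====

-- the window a[u:v)
def mid (A : List Char) (u v : Nat) : List Char := (A.drop u).take (v - u)

-- "reversing a[u:v) produces b[u:v)"
def PP (A B : List Char) (u v : Nat) : Prop := (mid A u v).reverse = mid B u v

-- the common characterisation both ports are reduced to
def GoalP (A B : List Char) : Prop :=
  ∃ u v : Nat, v ≤ A.length ∧ u < v ∧ PP A B u v ∧
    A.take u = B.take u ∧ A.drop v = B.drop v ∧
    (mid A u v).count '1' % 2 = 0 ∧ 0 < (mid A u v).count '1'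

lemma chars_count_go_single (c : Char) :
    ∀ (l : List Char) (fuel acc : Nat), l.length ≤ fuel →
      PySem.Chars.count.go [c] fuel l acc = acc + l.count c := by
  intro l
  induction l with
  | nil => intro fuel acc h; cases fuel <;> simp [PySem.Chars.count.go]
  | cons x t ih =>
    intro fuel acc h
    cases fuel with
    | zero => simp at h
    | succ m =>
      rw [PySem.Chars.count.go]
      by_cases hxc : c = x
      · subst hxc
        have h1 : [c].isPrefixOf (c :: t) = true := by simp [List.isPrefixOf]
        rw [h1]
        simp only [if_true]
        rw [List.length_singleton, List.drop_one, List.tail_cons]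
        rw [ih m (acc + 1) (by simpa using h)]
        rw [List.count_cons]
        simp only [BEq.rfl, if_true]
        omega
      · have h1 : [c].isPrefixOf (x :: t) = false := by simp [List.isPrefixOf, hxc]
        rw [h1]
        simp only [Bool.false_eq_true, if_false]
        rw [ih m acc (by simpa using h)]
        rw [List.count_cons]
        have h2 : (x == c) = false := by
          simp only [beq_eq_false_iff_ne, ne_eq]
          exact fun h' => hxc h'.symm
        simp [h2]
lemma chars_count_single (l : List Char) (c : Char) :
    PySem.Chars.count l [c] = l.count c := by
  rw [PySem.Chars.count]
  simp only [List.isEmpty_cons, Bool.false_eq_true, if_false]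
  rw [chars_count_go_single c l l.length 0 le_rfl]
  omega
lemma mid_length (A : List Char) (u v : Nat) (hv : v ≤ A.length) :
    (mid A u v).length = v - u := by
  simp [mid]; omega

lemma mid_decomp (A : List Char) (u v : Nat) (hu : 1 ≤ u) (huv : u ≤ v) (hv : v < A.length) :
    mid A (u - 1) (v + 1) =
      A[u - 1]'(by omega) :: (mid A u v ++ [A[v]'hv]) := by
  have e : u - 1 + 1 = u := by omega
  have hdrop : A.drop (u - 1) = A[u - 1]'(by omega) :: A.drop u := by
    rw [List.drop_eq_getElem_cons (by omega : u - 1 < A.length), e]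
  have htake : (A.drop u).take (v - u + 1) = mid A u v ++ [A[v]'hv] := by
    rw [List.take_add_one]
    congr 1
    have e2 : u + (v - u) = v := by omega
    rw [List.getElem?_drop, e2, List.getElem?_eq_getElem hv]
    rfl
  unfold mid
  have h2 : v + 1 - (u - 1) = v - u + 1 + 1 := by omega
  rw [h2, hdrop, List.take_succ_cons]
  exact congrArg _ htake
lemma mid_single (A : List Char) (m : Nat) (hm : m < A.length) :
    mid A m (m + 1) = [A[m]'hm] := by
  unfold mid
  have h2 : m + 1 - m = 0 + 1 := by omega
  rw [h2, List.take_add_one]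
  have e2 : m + 0 = m := by omega
  rw [List.getElem?_drop, e2, List.getElem?_eq_getElem hm]
  rfl
lemma concat_eq_iff (A B : List Char) (u v : Nat) (hlen : A.length = B.length)
    (huv : u ≤ v) (hv : v ≤ A.length) :
    (A.take u ++ (mid A u v).reverse ++ A.drop v = B) ↔
      (A.take u = B.take u ∧ PP A B u v ∧ A.drop v = B.drop v) := by
  have hB : B = B.take u ++ (mid B u v ++ B.drop v) := by
    conv_lhs => rw [← List.take_append_drop u B]
    congr 1
    conv_lhs => rw [← List.take_append_drop (v - u) (B.drop u)]
    congr 1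
    rw [List.drop_drop]
    congr 1
    omega
  have lA : (A.take u).length = u := by simp; omega
  have lB : (B.take u).length = u := by simp; omega
  have lmA : (mid A u v).reverse.length = v - u := by
    rw [List.length_reverse, mid_length A u v hv]
  have lmB : (mid B u v).length = v - u := mid_length B u v (by omega)
  constructor
  · intro h
    rw [List.append_assoc] at h
    conv_rhs at h => rw [hB]
    obtain ⟨e1, h⟩ := List.append_inj h (lA.trans lB.symm)
    obtain ⟨e2, e3⟩ := List.append_inj h (lmA.trans lmB.symm)
    exact ⟨e1, e2, e3⟩
  · rintro ⟨e1, e2, e3⟩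
    rw [List.append_assoc, e1, e2, e3, ← hB]
lemma lcpLen_take_iff :
    ∀ (A B : List Char) (u : Nat), u ≤ A.length → u ≤ B.length →
      (A.take u = B.take u ↔ u ≤ lcpLen A B) := by
  intro A
  induction A with
  | nil =>
    intro B u h1 h2
    have : u = 0 := by simpa using h1
    subst this
    simp [lcpLen]
  | cons x xs ih =>
    intro B u h1 h2
    cases B with
    | nil =>
      have : u = 0 := by simpa using h2
      subst this
      simp
    | cons y ys =>
      cases u with
      | zero => simp
      | succ w =>
        rw [List.take_succ_cons, List.take_succ_cons]
        unfold lcpLen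
        by_cases hxy : x = y
        · subst hxy
          simp only [BEq.rfl, if_true, List.cons.injEq, true_and]
          rw [ih ys w (by simpa using h1) (by simpa using h2)]
          omega
        · have : (x == y) = false := by simpa using hxy
          simp [this, hxy]

lemma drop_eq_iff (A B : List Char) (hlen : A.length = B.length) (v : Nat) (hv : v ≤ A.length) :
    (A.drop v = B.drop v ↔ A.length - v ≤ lcpLen A.reverse B.reverse) := by
  rw [← List.reverse_inj, List.reverse_drop, List.reverse_drop, hlen]
  exact lcpLen_take_iff A.reverse B.reverse (B.length - v)
    (by rw [List.length_reverse, ← hlen]; omega) (by rw [List.length_reverse, ← hlen]; omega)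

lemma PP_peel (A B : List Char) (hlen : A.length = B.length) (u v : Nat)
    (hu : 1 ≤ u) (huv : u ≤ v) (hv : v < A.length) :
    PP A B (u - 1) (v + 1) ↔
      (A[v]'hv = B[u - 1]'(by omega) ∧ A[u - 1]'(by omega) = B[v]'(by omega) ∧ PP A B u v) := by
  unfold PP
  rw [mid_decomp A u v hu huv hv, mid_decomp B u v hu huv (by omega)]
  rw [List.reverse_cons, List.reverse_append, List.reverse_singleton]
  simp only [List.cons_append, List.cons.injEq]
  constructor
  · rintro ⟨e1, h⟩
    have hl : ((mid A u v).reverse ++ [A[u - 1]'(by omega)]).length =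
        (mid B u v ++ [B[v]'(by omega : v < B.length)]).length := by
      simp [mid_length A u v (by omega), mid_length B u v (by omega)]
    have h' : (mid A u v).reverse ++ [A[u - 1]'(by omega)] =
        mid B u v ++ [B[v]'(by omega : v < B.length)] := by simpa using h
    obtain ⟨e2, e3⟩ := List.append_inj h'
      (by rw [List.length_reverse, mid_length A u v (by omega), mid_length B u v (by omega)])
    simp at e3
    exact ⟨e1, e3, e2⟩
  · rintro ⟨e1, e2, e3⟩
    refine ⟨e1, ?_⟩
    simp [e3, e2]
lemma PP_mono (A B : List Char) (hlen : A.length = B.length) (u v : Nat) :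
    ∀ t : Nat, u ≤ v → t ≤ u → v + t ≤ A.length → PP A B (u - t) (v + t) → PP A B u v := by
  intro t
  induction t with
  | zero => intro _ _ _ h; simpa using h
  | succ t ih =>
    intro huv ht hv h
    apply ih huv (by omega) (by omega)
    have e1 : u - (t + 1) = (u - t) - 1 := by omega
    have e2 : v + (t + 1) = (v + t) + 1 := by omega
    rw [e1, e2] at h
    exact ((PP_peel A B hlen (u - t) (v + t) (by omega) (by omega) (by omega)).mp h).2.2

lemma cnt_step (A : List Char) (u v : Nat) (hu : 1 ≤ u) (huv : u ≤ v) (hv : v < A.length) :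
    (mid A (u - 1) (v + 1)).count '1' =
      (mid A u v).count '1' + (if A[u - 1]'(by omega) = '1' then 1 else 0)
        + (if A[v]'hv = '1' then 1 else 0) := by
  rw [mid_decomp A u v hu huv hv]
  rw [List.count_cons, List.count_append, List.count_singleton]
  simp only [beq_iff_eq]
  split_ifs <;> omega

def HitP (A : List Char) (l : Nat) (r : Int) (u v : Nat) : Prop :=
  u < v ∧ u ≤ l ∧ (v : Int) ≥ r + 1 ∧ (mid A u v).count '1' % 2 = 0 ∧ 0 < (mid A u v).count '1'

lemma expandB_iff (A B : List Char) (n l : Nat) (r : Int) (hn : n = A.length)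
    (hlen : A.length = B.length) :
    ∀ (i j : Nat) (cnt : Int) (good : Bool), i ≤ j → j ≤ n →
      cnt = ((mid A i j).count '1' : Int) → (good = true ↔ PP A B i j) →
      (expandB A B n l r i j cnt good = true ↔
        ∃ t, t ≤ i ∧ j + t ≤ n ∧ PP A B (i - t) (j + t) ∧ HitP A l r (i - t) (j + t)) := by
  intro i
  induction i using Nat.strong_induction_on with
  | _ i IH =>
    intro j cnt good hij hjn hcnt hgood
    rw [expandB]
    cases good with
    | false =>
      rw [if_neg (by simp)]
      simp only [Bool.false_eq_true, false_iff, not_exists]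
      rintro t ⟨ht, htn, hP, hHit⟩
      have := hgood.mpr (PP_mono A B hlen i j t hij ht (by omega) hP)
      simp at this
    | true =>
      rw [if_pos rfl]
      split_ifs with hhit hstop
      · simp only [true_iff]
        refine ⟨0, by omega, by omega, ?_, ?_⟩
        · simpa using hgood.mp rfl
        · simp only [Nat.sub_zero, Nat.add_zero]
          simp only [Bool.and_eq_true, decide_eq_true_eq, beq_iff_eq] at hhit
          obtain ⟨⟨⟨⟨h1, h2⟩, h3⟩, h4⟩, h5⟩ := hhit
          exact ⟨h1, h2, h3, by omega, by omega⟩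
      · simp only [false_iff, not_exists]
        rintro t ⟨ht, htn, hP, hHit⟩
        have ht0 : t = 0 := by
          simp only [Bool.or_eq_true, beq_iff_eq] at hstop
          omega
        subst ht0
        simp only [Nat.sub_zero, Nat.add_zero] at hP hHit
        apply hhit
        obtain ⟨h1, h2, h3, h4, h5⟩ := hHit
        simp only [Bool.and_eq_true, decide_eq_true_eq, beq_iff_eq]
        exact ⟨⟨⟨⟨h1, h2⟩, h3⟩, by omega⟩, by omega⟩
      · -- step: recurse on the wider window [i-1, j+1)
        simp only [Bool.or_eq_true, beq_iff_eq, not_or] at hstop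
        obtain ⟨hi0, hjn0⟩ := hstop
        have hi1 : 1 ≤ i := by omega
        have hjA : j < A.length := by omega
        have hiA : i - 1 < A.length := by omega
        have hiB : i - 1 < B.length := by omega
        have hjB : j < B.length := by omega
        have hPij : PP A B i j := hgood.mp rfl
        have gA1 : PySem.List.pyGetD A ((i - 1 : Nat) : Int) ' ' = A[i - 1]'hiA := by
          rw [PySem.List.pyGetD_natCast, List.getD_eq_getElem A ' ' hiA]
        have ej : (((j + 1 : Nat) : Int) - 1) = ((j : Nat) : Int) := by push_cast; ring
        have gA2 : PySem.List.pyGetD A (((j + 1 : Nat) : Int) - 1) ' ' = A[j]'hjA := by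
          rw [ej, PySem.List.pyGetD_natCast, List.getD_eq_getElem A ' ' hjA]
        have gB1 : PySem.List.pyGetD B ((i - 1 : Nat) : Int) ' ' = B[i - 1]'hiB := by
          rw [PySem.List.pyGetD_natCast, List.getD_eq_getElem B ' ' hiB]
        have gB2 : PySem.List.pyGetD B (((j + 1 : Nat) : Int) - 1) ' ' = B[j]'hjB := by
          rw [ej, PySem.List.pyGetD_natCast, List.getD_eq_getElem B ' ' hjB]
        simp only [gA1, gA2, gB1, gB2]
        have hgood' : (((A[i - 1]'hiA == B[j]'hjB) && (A[j]'hjA == B[i - 1]'hiB)) = true)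
            ↔ PP A B (i - 1) (j + 1) := by
          rw [PP_peel A B hlen i j hi1 hij hjA]
          simp only [Bool.and_eq_true, beq_iff_eq]
          constructor
          · rintro ⟨x, y⟩; exact ⟨y, x, hPij⟩
          · rintro ⟨x, y, -⟩; exact ⟨y, x⟩
        have hcnt' : cnt + (if (A[i - 1]'hiA == '1') = true then 1 else 0)
              + (if (A[j]'hjA == '1') = true then 1 else 0)
            = ((mid A (i - 1) (j + 1)).count '1' : Int) := by
          rw [cnt_step A i j hi1 hij hjA, hcnt]
          simp only [beq_iff_eq]
          push_cast
          split_ifs <;> omega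
        rw [IH (i - 1) (by omega) (j + 1)
          (cnt + (if (A[i - 1]'hiA == '1') = true then 1 else 0)
               + (if (A[j]'hjA == '1') = true then 1 else 0))
          ((A[i - 1]'hiA == B[j]'hjB) && (A[j]'hjA == B[i - 1]'hiB))
          (by omega) (by omega) hcnt' hgood']
        constructor
        · rintro ⟨t', h1, h2, h3, h4⟩
          have e1 : i - (t' + 1) = (i - 1) - t' := by omega
          have e2 : j + (t' + 1) = (j + 1) + t' := by omega
          exact ⟨t' + 1, by omega, by omega, by rw [e1, e2]; exact h3, by rw [e1, e2]; exact h4⟩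
        · rintro ⟨t, h1, h2, h3, h4⟩
          cases t with
          | zero =>
            exfalso
            apply hhit
            simp only [Nat.sub_zero, Nat.add_zero] at h3 h4
            obtain ⟨k1, k2, k3, k4, k5⟩ := h4
            simp only [Bool.and_eq_true, decide_eq_true_eq, beq_iff_eq]
            exact ⟨⟨⟨⟨k1, k2⟩, k3⟩, by omega⟩, by omega⟩
          | succ t' =>
            have e1 : (i - 1) - t' = i - (t' + 1) := by omega
            have e2 : (j + 1) + t' = j + (t' + 1) := by omega
            exact ⟨t', by omega, by omega, by rw [e1, e2]; exact h3, by rw [e1, e2]; exact h4⟩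

lemma f_cond_iff (A Bl : List Char) (hlen : A.length = Bl.length) (u v : Nat)
    (huv : u < v) (hv : v ≤ A.length) :
    (((PySem.Chars.count (PySem.List.slice A (some (u : Int)) (some (v : Int))) ['1'] % 2 == 0 &&
       decide (0 < PySem.Chars.count (PySem.List.slice A (some (u : Int)) (some (v : Int))) ['1'])) &&
      ((PySem.List.slice A (some 0) (some (u : Int))
          ++ ((PySem.List.slice? (PySem.List.slice A (some (u : Int)) (some (v : Int))) none none (-1)).getD [])
          ++ PySem.List.slice A (some (v : Int)) (some ((A.length : Nat) : Int))) == Bl)) = true)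
    ↔ (PP A Bl u v ∧ A.take u = Bl.take u ∧ A.drop v = Bl.drop v ∧
        (mid A u v).count '1' % 2 = 0 ∧ 0 < (mid A u v).count '1') := by
  rw [PySem.List.slice_natCast, PySem.List.slice?_none_none_neg_one]
  rw [PySem.List.slice_zero_start, PySem.List.slice_to_natCast, PySem.List.slice_natCast]
  simp only [Option.getD_some, chars_count_single, Bool.and_eq_true, decide_eq_true_eq,
    beq_iff_eq]
  have hmid : (A.drop u).take (v - u) = mid A u v := rfl
  have htail : (A.drop v).take (A.length - v) = A.drop v := List.take_of_length_le (by simp)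
  rw [hmid, htail]
  rw [concat_eq_iff A Bl u v hlen (by omega) hv]
  tauto

lemma f_true_iff (a b : String) :
    f a b = true ↔ (a.toList.length = b.toList.length ∧ GoalP a.toList b.toList) := by
  rw [f]
  simp only [PySem.Str.len_eq]
  by_cases hlen : a.toList.length = b.toList.length
  · rw [if_pos (by rw [beq_iff_eq]; exact_mod_cast hlen)]
    rw [List.any_eq_true]
    constructor
    · rintro ⟨i, hmem, hinner⟩
      rw [PySem.List.mem_pyRange_one] at hmem
      rw [List.any_eq_true] at hinner
      obtain ⟨jj, hmemj, hcond⟩ := hinner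
      rw [PySem.List.mem_pyRange_one] at hmemj
      have hiu : i = ((i.toNat : Nat) : Int) := (Int.toNat_of_nonneg hmem.1).symm
      have hjv : jj = ((jj.toNat : Nat) : Int) := (Int.toNat_of_nonneg (by omega)).symm
      rw [hiu, hjv] at hcond
      have huv : i.toNat < jj.toNat := by omega
      have hvn : jj.toNat ≤ a.toList.length := by omega
      rw [f_cond_iff a.toList b.toList hlen i.toNat jj.toNat huv hvn] at hcond
      exact ⟨hlen, i.toNat, jj.toNat, hvn, huv, hcond⟩
    · rintro ⟨-, u, v, hvn, huv, hrest⟩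
      refine ⟨(u : Int), ?_, ?_⟩
      · rw [PySem.List.mem_pyRange_one]
        exact ⟨by omega, by omega⟩
      · rw [List.any_eq_true]
        refine ⟨(v : Int), ?_, ?_⟩
        · rw [PySem.List.mem_pyRange_one]
          exact ⟨by omega, by omega⟩
        · rw [f_cond_iff a.toList b.toList hlen u v huv hvn]
          exact hrest
  · rw [if_neg (by rw [beq_iff_eq]; intro h; exact hlen (by exact_mod_cast h))]
    simp only [Bool.false_eq_true, false_iff, not_and]
    intro h
    exact absurd h hlen

lemma f_alt_true_iff (a b : String) :
    f_alt a b = true ↔ (a.toList.length = b.toList.length ∧ GoalP a.toList b.toList) := by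
  have hmod : ∀ k : Nat, PySem.Int.mod (k : Int) 2 = ((k % 2 : Nat) : Int) := by
    intro k; unfold PySem.Int.mod; rw [Int.fmod_eq_emod]; simp
  have hdiv : ∀ k : Nat, PySem.Int.floordiv (k : Int) 2 = ((k / 2 : Nat) : Int) := by
    intro k; unfold PySem.Int.floordiv; rw [Int.fdiv_eq_ediv]; simp
  simp only [f_alt]
  by_cases hlen : a.toList.length = b.toList.length
  case neg =>
    rw [if_pos hlen]
    simp only [Bool.false_eq_true, false_iff, not_and]
    intro h
    exact absurd h hlen
  case pos =>
    rw [if_neg (fun h => h hlen)]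
    set A := a.toList with hA
    set B := b.toList with hB
    set n := A.length with hn
    set l := lcpLen A B with hl
    set r : Int := (n : Int) - 1 - (lcpLen A.reverse B.reverse : Int) with hr
    have hpre_iff : ∀ u : Nat, u ≤ n → (A.take u = B.take u ↔ u ≤ l) := by
      intro u hu
      exact lcpLen_take_iff A B u (by omega) (by omega)
    have hsuf_iff : ∀ v : Nat, v ≤ n → (A.drop v = B.drop v ↔ ((v : Int) ≥ r + 1)) := by
      intro v hv
      rw [drop_eq_iff A B hlen v hv, hr]
      constructor <;> intro h <;> omega
    rw [List.any_eq_true]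
    constructor
    · rintro ⟨s, hmem, hbody⟩
      rw [PySem.List.mem_pyRange_one] at hmem
      obtain ⟨hs1, hs2⟩ := hmem
      have hsk : s = ((s.toNat : Nat) : Int) := (Int.toNat_of_nonneg (by omega)).symm
      set k := s.toNat with hk
      rw [hsk] at hbody hs2
      have hk1 : 1 ≤ k := by omega
      have hk2 : k < 2 * n := by omega
      rw [hmod k, hdiv k] at hbody
      simp only [Int.toNat_natCast] at hbody
      by_cases hp : k % 2 = 0
      · rw [if_pos (by rw [hp]; decide)] at hbody
        set m := k / 2 with hm
        have hmn : m ≤ n := by omega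
        obtain ⟨t, ht, htn, hP, hHit⟩ :=
          (expandB_iff A B n l r hn hlen m m 0 true le_rfl hmn (by simp [mid])
            (by simp [PP, mid])).mp hbody
        obtain ⟨h1, h2, h3, h4, h5⟩ := hHit
        exact ⟨hlen, m - t, m + t, by omega, h1, hP,
          (hpre_iff (m - t) (by omega)).mpr h2, (hsuf_iff (m + t) (by omega)).mpr h3, h4, h5⟩
      · rw [if_neg (by rw [show k % 2 = 1 from by omega]; decide)] at hbody
        set m := k / 2 with hm
        have hmA : m < A.length := by omega
        have hmB : m < B.length := by omega
        have gA : PySem.List.pyGetD A ((m : Nat) : Int) ' ' = A[m]'hmA := by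
          rw [PySem.List.pyGetD_natCast, List.getD_eq_getElem A ' ' hmA]
        have gB : PySem.List.pyGetD B ((m : Nat) : Int) ' ' = B[m]'hmB := by
          rw [PySem.List.pyGetD_natCast, List.getD_eq_getElem B ' ' hmB]
        simp only [gA, gB] at hbody
        have hcnt : (if (A[m]'hmA == '1') = true then (1 : Int) else 0)
            = ((mid A m (m + 1)).count '1' : Int) := by
          rw [mid_single A m hmA]
          simp only [List.count_cons, List.count_nil, beq_iff_eq]
          split_ifs <;> simp
        have hgood : ((A[m]'hmA == B[m]'hmB) = true) ↔ PP A B m (m + 1) := by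
          unfold PP
          rw [mid_single A m hmA, mid_single B m hmB]
          simp
        obtain ⟨t, ht, htn, hP, hHit⟩ :=
          (expandB_iff A B n l r hn hlen m (m + 1) _ _ (by omega) (by omega) hcnt hgood).mp hbody
        obtain ⟨h1, h2, h3, h4, h5⟩ := hHit
        exact ⟨hlen, m - t, m + 1 + t, by omega, h1, hP,
          (hpre_iff (m - t) (by omega)).mpr h2, (hsuf_iff (m + 1 + t) (by omega)).mpr h3, h4, h5⟩
    · rintro ⟨-, u, v, hv, huv, hP, hpre, hsuf, hc1, hc2⟩
      refine ⟨((u + v : Nat) : Int), ?_, ?_⟩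
      · rw [PySem.List.mem_pyRange_one]
        exact ⟨by omega, by omega⟩
      · rw [hmod, hdiv]
        simp only [Int.toNat_natCast]
        by_cases hp : (u + v) % 2 = 0
        · rw [if_pos (by rw [hp]; decide)]
          set m := (u + v) / 2 with hm
          have h2m : 2 * m = u + v := by omega
          apply (expandB_iff A B n l r hn hlen m m 0 true le_rfl (by omega) (by simp [mid])
            (by simp [PP, mid])).mpr
          have e1 : m - (m - u) = u := by omega
          have e2 : m + (m - u) = v := by omega
          refine ⟨m - u, by omega, by omega, by rw [e1, e2]; exact hP, ?_⟩
          rw [e1, e2]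
          exact ⟨huv, (hpre_iff u (by omega)).mp hpre, (hsuf_iff v (by omega)).mp hsuf, hc1, hc2⟩
        · rw [if_neg (by rw [show (u + v) % 2 = 1 from by omega]; decide)]
          set m := (u + v) / 2 with hm
          have h2m : 2 * m + 1 = u + v := by omega
          have hmA : m < A.length := by omega
          have hmB : m < B.length := by omega
          have gA : PySem.List.pyGetD A ((m : Nat) : Int) ' ' = A[m]'hmA := by
            rw [PySem.List.pyGetD_natCast, List.getD_eq_getElem A ' ' hmA]
          have gB : PySem.List.pyGetD B ((m : Nat) : Int) ' ' = B[m]'hmB := by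
            rw [PySem.List.pyGetD_natCast, List.getD_eq_getElem B ' ' hmB]
          simp only [gA, gB]
          have hcnt : (if (A[m]'hmA == '1') = true then (1 : Int) else 0)
              = ((mid A m (m + 1)).count '1' : Int) := by
            rw [mid_single A m hmA]
            simp only [List.count_cons, List.count_nil, beq_iff_eq]
            split_ifs <;> simp
          have hgood : ((A[m]'hmA == B[m]'hmB) = true) ↔ PP A B m (m + 1) := by
            unfold PP
            rw [mid_single A m hmA, mid_single B m hmB]
            simp
          apply (expandB_iff A B n l r hn hlen m (m + 1) _ _ (by omega) (by omega) hcnt hgood).mpr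
          have e1 : m - (m - u) = u := by omega
          have e2 : m + 1 + (m - u) = v := by omega
          refine ⟨m - u, by omega, by omega, by rw [e1, e2]; exact hP, ?_⟩
          rw [e1, e2]
          exact ⟨huv, (hpre_iff u (by omega)).mp hpre, (hsuf_iff v (by omega)).mp hsuf, hc1, hc2⟩

-- ===== VERDICT (by name: the statement is the Claim_ definition above) =====
theorem f_spec : Claim_equal_f := by
  intro a b _
  unfold Spec_f
  have h1 := f_true_iff a b
  have h2 := f_alt_true_iff a b
  cases hA : f a b <;> cases hB : f_alt a b <;> simp_all
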